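-- pv_equiv track=rewrite | github.com/roosterMAP/rmKit | quickmaterial.py | validate_material_name
-- ===== SOURCE A (Python) =====
-- import string
--
-- def validate_material_name( mat_name ):
-- 	if mat_name == '':
-- 		return False
-- 	valid_chars = "-_(){}{}\\".format( string.ascii_letters, string.digits )
-- 	for c in mat_name:
-- 		if c not in valid_chars:
-- 			return False
-- 	return True
-- ===== SOURCE B (Python) =====
-- import re
--
-- _VALID_RE = re.compile(r'[-_()\\a-zA-Z0-9]+')
--
-- def validate_material_name(mat_name):
--     return bool(_VALID_RE.fullmatch(mat_name))
-- ===== Notes on version B (the rewrite author's own statement) =====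
-- stated objective: idiomatic
-- what changed: Replaced the explicit per-character loop over a constructed valid-character string with a single precompiled regex fullmatch whose one-or-more quantifier also covers the empty-string guard.
import Mathlib
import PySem

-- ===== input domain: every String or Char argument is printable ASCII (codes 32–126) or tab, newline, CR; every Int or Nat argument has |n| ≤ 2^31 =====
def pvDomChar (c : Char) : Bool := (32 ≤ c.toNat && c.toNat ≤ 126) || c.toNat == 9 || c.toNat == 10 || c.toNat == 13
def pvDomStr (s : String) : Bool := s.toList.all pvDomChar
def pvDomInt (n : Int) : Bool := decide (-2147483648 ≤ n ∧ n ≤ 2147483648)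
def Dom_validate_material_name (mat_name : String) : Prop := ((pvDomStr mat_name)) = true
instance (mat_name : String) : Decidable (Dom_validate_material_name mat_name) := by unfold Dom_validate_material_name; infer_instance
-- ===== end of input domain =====

-- ===== PORT A =====
-- B changes: per-character loop over a built valid-character string replaced by a
-- single regex-style full match (character-class predicate + nonempty); objective: idiomatic.

-- A builds valid_chars = "-_(){}{}\\".format(ascii_letters, digits); the braces are
-- format placeholders, so the literal set is "-_()" ++ letters ++ digits ++ "\".
def pvValidChars : String := "-_()abcdefghijklmnopqrstuvwxyzABCDEFGHIJKLMNOPQRSTUVWXYZ0123456789\\"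

-- the for-loop with early return False
def pvLoopA : List Char → Bool
  | [] => true
  | c :: rest => if (pvValidChars.toList.contains c) = false then false else pvLoopA rest

def validate_material_name (mat_name : String) : Bool :=
  if mat_name = "" then false
  else pvLoopA mat_name.toList

-- ===== PORT B =====
-- the regex character class [-_()\\a-zA-Z0-9], one char at a time
def pvClassB (c : Char) : Bool :=
  c = '-' || c = '_' || c = '(' || c = ')' || c = '\\' ||
  ('a' ≤ c && c ≤ 'z') || ('A' ≤ c && c ≤ 'Z') || ('0' ≤ c && c ≤ '9')

-- fullmatch of [class]+ : at least one char, every char in the class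
def validate_material_name_alt (mat_name : String) : Bool :=
  !mat_name.toList.isEmpty && mat_name.toList.all pvClassB

-- ===== PRECONDITION & SPEC =====
def Spec_validate_material_name (mat_name : String) (out : Bool) : Prop := out = validate_material_name_alt mat_name
instance (mat_name : String) (out : Bool) : Decidable (Spec_validate_material_name mat_name out) := by unfold Spec_validate_material_name; infer_instance

-- ===== CLAIM (what is proved, stated in full; the proofs are below) =====
def Claim_equal_validate_material_name : Prop := ∀ (mat_name : String), Dom_validate_material_name mat_name → Spec_validate_material_name mat_name (validate_material_name mat_name)

-- ===== LEMMAS AND PROOFS =====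
theorem pv_valid_toList : pvValidChars.toList = ['-', '_', '(', ')', 'a', 'b', 'c', 'd', 'e', 'f', 'g', 'h', 'i', 'j', 'k', 'l', 'm', 'n', 'o', 'p', 'q', 'r', 's', 't', 'u', 'v', 'w', 'x', 'y', 'z', 'A', 'B', 'C', 'D', 'E', 'F', 'G', 'H', 'I', 'J', 'K', 'L', 'M', 'N', 'O', 'P', 'Q', 'R', 'S', 'T', 'U', 'V', 'W', 'X', 'Y', 'Z', '0', '1', '2', '3', '4', '5', '6', '7', '8', '9', '\\'] := rfl

theorem pvc40 : ('(' : Char).val.toNat = 40 := rfl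
theorem pvc41 : (')' : Char).val.toNat = 41 := rfl
theorem pvc45 : ('-' : Char).val.toNat = 45 := rfl
theorem pvc48 : ('0' : Char).val.toNat = 48 := rfl
theorem pvc49 : ('1' : Char).val.toNat = 49 := rfl
theorem pvc50 : ('2' : Char).val.toNat = 50 := rfl
theorem pvc51 : ('3' : Char).val.toNat = 51 := rfl
theorem pvc52 : ('4' : Char).val.toNat = 52 := rfl
theorem pvc53 : ('5' : Char).val.toNat = 53 := rfl
theorem pvc54 : ('6' : Char).val.toNat = 54 := rfl
theorem pvc55 : ('7' : Char).val.toNat = 55 := rfl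
theorem pvc56 : ('8' : Char).val.toNat = 56 := rfl
theorem pvc57 : ('9' : Char).val.toNat = 57 := rfl
theorem pvc65 : ('A' : Char).val.toNat = 65 := rfl
theorem pvc66 : ('B' : Char).val.toNat = 66 := rfl
theorem pvc67 : ('C' : Char).val.toNat = 67 := rfl
theorem pvc68 : ('D' : Char).val.toNat = 68 := rfl
theorem pvc69 : ('E' : Char).val.toNat = 69 := rfl
theorem pvc70 : ('F' : Char).val.toNat = 70 := rfl
theorem pvc71 : ('G' : Char).val.toNat = 71 := rfl
theorem pvc72 : ('H' : Char).val.toNat = 72 := rfl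
theorem pvc73 : ('I' : Char).val.toNat = 73 := rfl
theorem pvc74 : ('J' : Char).val.toNat = 74 := rfl
theorem pvc75 : ('K' : Char).val.toNat = 75 := rfl
theorem pvc76 : ('L' : Char).val.toNat = 76 := rfl
theorem pvc77 : ('M' : Char).val.toNat = 77 := rfl
theorem pvc78 : ('N' : Char).val.toNat = 78 := rfl
theorem pvc79 : ('O' : Char).val.toNat = 79 := rfl
theorem pvc80 : ('P' : Char).val.toNat = 80 := rfl
theorem pvc81 : ('Q' : Char).val.toNat = 81 := rfl
theorem pvc82 : ('R' : Char).val.toNat = 82 := rfl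
theorem pvc83 : ('S' : Char).val.toNat = 83 := rfl
theorem pvc84 : ('T' : Char).val.toNat = 84 := rfl
theorem pvc85 : ('U' : Char).val.toNat = 85 := rfl
theorem pvc86 : ('V' : Char).val.toNat = 86 := rfl
theorem pvc87 : ('W' : Char).val.toNat = 87 := rfl
theorem pvc88 : ('X' : Char).val.toNat = 88 := rfl
theorem pvc89 : ('Y' : Char).val.toNat = 89 := rfl
theorem pvc90 : ('Z' : Char).val.toNat = 90 := rfl
theorem pvc92 : ('\\' : Char).val.toNat = 92 := rfl
theorem pvc95 : ('_' : Char).val.toNat = 95 := rfl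
theorem pvc97 : ('a' : Char).val.toNat = 97 := rfl
theorem pvc98 : ('b' : Char).val.toNat = 98 := rfl
theorem pvc99 : ('c' : Char).val.toNat = 99 := rfl
theorem pvc100 : ('d' : Char).val.toNat = 100 := rfl
theorem pvc101 : ('e' : Char).val.toNat = 101 := rfl
theorem pvc102 : ('f' : Char).val.toNat = 102 := rfl
theorem pvc103 : ('g' : Char).val.toNat = 103 := rfl
theorem pvc104 : ('h' : Char).val.toNat = 104 := rfl
theorem pvc105 : ('i' : Char).val.toNat = 105 := rfl
theorem pvc106 : ('j' : Char).val.toNat = 106 := rfl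
theorem pvc107 : ('k' : Char).val.toNat = 107 := rfl
theorem pvc108 : ('l' : Char).val.toNat = 108 := rfl
theorem pvc109 : ('m' : Char).val.toNat = 109 := rfl
theorem pvc110 : ('n' : Char).val.toNat = 110 := rfl
theorem pvc111 : ('o' : Char).val.toNat = 111 := rfl
theorem pvc112 : ('p' : Char).val.toNat = 112 := rfl
theorem pvc113 : ('q' : Char).val.toNat = 113 := rfl
theorem pvc114 : ('r' : Char).val.toNat = 114 := rfl
theorem pvc115 : ('s' : Char).val.toNat = 115 := rfl
theorem pvc116 : ('t' : Char).val.toNat = 116 := rfl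
theorem pvc117 : ('u' : Char).val.toNat = 117 := rfl
theorem pvc118 : ('v' : Char).val.toNat = 118 := rfl
theorem pvc119 : ('w' : Char).val.toNat = 119 := rfl
theorem pvc120 : ('x' : Char).val.toNat = 120 := rfl
theorem pvc121 : ('y' : Char).val.toNat = 121 := rfl
theorem pvc122 : ('z' : Char).val.toNat = 122 := rfl

theorem pv_char_eq (c : Char) : (decide (c ∈ pvValidChars.toList)) = pvClassB c := by
  apply Bool.eq_iff_iff.mpr
  simp only [decide_eq_true_eq, pv_valid_toList, List.mem_cons, pvClassB, Bool.or_eq_true, Bool.and_eq_true,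
    decide_eq_true_eq, List.not_mem_nil, or_false,
    Char.ext_iff, Char.le_def, UInt32.le_iff_toNat_le, ← UInt32.toNat_inj,
    pvc40, pvc41, pvc45, pvc48, pvc49, pvc50, pvc51, pvc52, pvc53, pvc54, pvc55, pvc56, pvc57, pvc65, pvc66, pvc67, pvc68, pvc69, pvc70, pvc71, pvc72, pvc73, pvc74, pvc75, pvc76, pvc77, pvc78, pvc79, pvc80, pvc81, pvc82, pvc83, pvc84, pvc85, pvc86, pvc87, pvc88, pvc89, pvc90, pvc92, pvc95, pvc97, pvc98, pvc99, pvc100, pvc101, pvc102, pvc103, pvc104, pvc105, pvc106, pvc107, pvc108, pvc109, pvc110, pvc111, pvc112, pvc113, pvc114, pvc115, pvc116, pvc117, pvc118, pvc119, pvc120, pvc121, pvc122]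
  omega

theorem pv_loopA_eq (l : List Char) : pvLoopA l = l.all pvClassB := by
  induction l with
  | nil => rfl
  | cons c rest ih => simp only [pvLoopA, List.all_cons, ih, List.contains_eq_mem, pv_char_eq]; cases pvClassB c <;> simp

-- ===== VERDICT (by name: the statement is the Claim_ definition above) =====
theorem validate_material_name_spec : Claim_equal_validate_material_name := by
  intro s _
  unfold Spec_validate_material_name validate_material_name validate_material_name_alt
  by_cases h : s = ""
  · simp [h]
  · have hl : s.toList ≠ [] := by
      simpa [String.toList_eq_nil_iff] using h
    simp [h, pv_loopA_eq, hl]
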